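-- pv_equiv track=rewrite | github.com/HikariDev/CS-1110 | WorldLifeExp.py | which_row
-- ===== SOURCE A (Python) =====
-- def which_row(country, continent, region) -> int:
--     rows = [['Europe', 'United States', 'Canada', 'Australia', 'New Zealand', 'Japan', 'South Korea'],
--           ['North America'], ['Oceania'], ['South America'], ['Southeast Asia', 'Eastern Asia'],
--           ['Middle East', 'Southern Asia and Central Asia'], ['Africa']]
--     for row in range(len(rows)):
--         if country in rows[row] or continent in rows[row] or region in rows[row]:
--             return row
--     return -1
-- ===== SOURCE B (Python) =====
-- def which_row(country, continent, region) -> int: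
--     rows = [['Europe', 'United States', 'Canada', 'Australia', 'New Zealand', 'Japan', 'South Korea'],
--           ['North America'], ['Oceania'], ['South America'], ['Southeast Asia', 'Eastern Asia'],
--           ['Middle East', 'Southern Asia and Central Asia'], ['Africa']]
--     index = {}
--     for i, row in enumerate(rows):
--         for name in row:
--             index[name] = i
--     hits = [index[x] for x in (country, continent, region) if x in index]
--     return min(hits) if hits else -1
-- ===== Notes on version B (the rewrite author's own statement) =====
-- stated objective: idiomatic
-- what changed: Replaces the in-order row scan with three membership tests by a name-to-row dict built once, then returns the minimum of the indices found for country/continent/region (or -1), the way an experienced developer would index a lookup table.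
import Mathlib
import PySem

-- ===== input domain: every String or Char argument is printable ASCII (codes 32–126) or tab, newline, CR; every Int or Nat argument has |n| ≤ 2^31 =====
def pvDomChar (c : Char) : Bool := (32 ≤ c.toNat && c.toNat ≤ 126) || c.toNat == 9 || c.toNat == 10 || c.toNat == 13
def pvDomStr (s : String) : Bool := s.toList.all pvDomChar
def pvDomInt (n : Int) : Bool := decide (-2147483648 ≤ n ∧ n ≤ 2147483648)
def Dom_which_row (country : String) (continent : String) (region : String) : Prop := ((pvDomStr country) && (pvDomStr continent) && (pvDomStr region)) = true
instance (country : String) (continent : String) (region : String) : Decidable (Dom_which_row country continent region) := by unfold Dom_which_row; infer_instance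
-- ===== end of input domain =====

-- B replaces A's in-order row scan by a name→row dict built once; it returns the minimum
-- of the indices found for the three arguments (or -1), which equals A's first matching row.

-- the fixed lookup table, shared verbatim by both ports
def pvRows : List (List String) :=
  [["Europe", "United States", "Canada", "Australia", "New Zealand", "Japan", "South Korea"],
   ["North America"], ["Oceania"], ["South America"], ["Southeast Asia", "Eastern Asia"],
   ["Middle East", "Southern Asia and Central Asia"], ["Africa"]]

-- ===== PORT A =====
-- A's for-loop over row indices with an early return
def wrScan (country continent region : String) : List (List String) → Int → Int
  | [], _ => -1
  | row :: rest, i =>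
      if row.contains country || row.contains continent || row.contains region then i
      else wrScan country continent region rest (i + 1)

def which_row (country : String) (continent : String) (region : String) : Int :=
  wrScan country continent region pvRows 0

-- ===== PORT B =====
-- index = {}; for i, row in enumerate(rows): for name in row: index[name] = i
def wrIndex : PySem.Dict String Int :=
  (PySem.List.enumerate pvRows).foldl
    (fun d p => p.2.foldl (fun d name => d.insert name p.1) d) PySem.Dict.empty

def which_row_alt (country : String) (continent : String) (region : String) : Int :=
  -- hits = [index[x] for x in (country, continent, region) if x in index]  (guarded lookup = filterMap)
  let hits := [country, continent, region].filterMap (fun x => wrIndex.get? x)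
  -- min(hits) if hits else -1
  match PySem.List.min? hits (fun y => y) with
  | some m => m
  | none => -1

-- ===== PRECONDITION & SPEC =====
def Spec_which_row (country : String) (continent : String) (region : String) (out : Int) : Prop := out = which_row_alt country continent region
instance (country : String) (continent : String) (region : String) (out : Int) : Decidable (Spec_which_row country continent region out) := by unfold Spec_which_row; infer_instance

-- ===== CLAIM (what is proved, stated in full; the proofs are below) =====
def Claim_equal_which_row : Prop := ∀ (country : String) (continent : String) (region : String), Dom_which_row country continent region → Spec_which_row country continent region (which_row country continent region)

-- ===== LEMMAS AND PROOFS =====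

def wrVals : List (Option Int) := [none, some 0, some 1, some 2, some 3, some 4, some 5, some 6]

-- the dict B builds, evaluated once
set_option maxHeartbeats 1000000 in
theorem wrIndex_eq : wrIndex = PySem.Dict.mk
    [("Europe", 0), ("United States", 0), ("Canada", 0), ("Australia", 0), ("New Zealand", 0),
     ("Japan", 0), ("South Korea", 0), ("North America", 1), ("Oceania", 2), ("South America", 3),
     ("Southeast Asia", 4), ("Eastern Asia", 4), ("Middle East", 5),
     ("Southern Asia and Central Asia", 5), ("Africa", 6)] := by decide

-- membership in each row expressed through the dict lookup, plus the range of the lookup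
set_option maxHeartbeats 1000000 in
theorem wr_key (s : String) :
    ((["Europe", "United States", "Canada", "Australia", "New Zealand", "Japan", "South Korea"] : List String).contains s = (wrIndex.get? s == some 0))
  ∧ ((["North America"] : List String).contains s = (wrIndex.get? s == some 1))
  ∧ ((["Oceania"] : List String).contains s = (wrIndex.get? s == some 2))
  ∧ ((["South America"] : List String).contains s = (wrIndex.get? s == some 3))
  ∧ ((["Southeast Asia", "Eastern Asia"] : List String).contains s = (wrIndex.get? s == some 4))
  ∧ ((["Middle East", "Southern Asia and Central Asia"] : List String).contains s = (wrIndex.get? s == some 5))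
  ∧ ((["Africa"] : List String).contains s = (wrIndex.get? s == some 6))
  ∧ wrIndex.get? s ∈ wrVals := by
  rw [wrIndex_eq]
  by_cases h0 : s = "Europe"
  · subst h0; decide
  by_cases h1 : s = "United States"
  · subst h1; decide
  by_cases h2 : s = "Canada"
  · subst h2; decide
  by_cases h3 : s = "Australia"
  · subst h3; decide
  by_cases h4 : s = "New Zealand"
  · subst h4; decide
  by_cases h5 : s = "Japan"
  · subst h5; decide
  by_cases h6 : s = "South Korea"
  · subst h6; decide
  by_cases h7 : s = "North America"
  · subst h7; decide
  by_cases h8 : s = "Oceania"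
  · subst h8; decide
  by_cases h9 : s = "South America"
  · subst h9; decide
  by_cases h10 : s = "Southeast Asia"
  · subst h10; decide
  by_cases h11 : s = "Eastern Asia"
  · subst h11; decide
  by_cases h12 : s = "Middle East"
  · subst h12; decide
  by_cases h13 : s = "Southern Asia and Central Asia"
  · subst h13; decide
  by_cases h14 : s = "Africa"
  · subst h14; decide
  have q0 : ("Europe" == s) = false := beq_eq_false_iff_ne.mpr (Ne.symm h0)
  have q1 : ("United States" == s) = false := beq_eq_false_iff_ne.mpr (Ne.symm h1)
  have q2 : ("Canada" == s) = false := beq_eq_false_iff_ne.mpr (Ne.symm h2)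
  have q3 : ("Australia" == s) = false := beq_eq_false_iff_ne.mpr (Ne.symm h3)
  have q4 : ("New Zealand" == s) = false := beq_eq_false_iff_ne.mpr (Ne.symm h4)
  have q5 : ("Japan" == s) = false := beq_eq_false_iff_ne.mpr (Ne.symm h5)
  have q6 : ("South Korea" == s) = false := beq_eq_false_iff_ne.mpr (Ne.symm h6)
  have q7 : ("North America" == s) = false := beq_eq_false_iff_ne.mpr (Ne.symm h7)
  have q8 : ("Oceania" == s) = false := beq_eq_false_iff_ne.mpr (Ne.symm h8)
  have q9 : ("South America" == s) = false := beq_eq_false_iff_ne.mpr (Ne.symm h9)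
  have q10 : ("Southeast Asia" == s) = false := beq_eq_false_iff_ne.mpr (Ne.symm h10)
  have q11 : ("Eastern Asia" == s) = false := beq_eq_false_iff_ne.mpr (Ne.symm h11)
  have q12 : ("Middle East" == s) = false := beq_eq_false_iff_ne.mpr (Ne.symm h12)
  have q13 : ("Southern Asia and Central Asia" == s) = false := beq_eq_false_iff_ne.mpr (Ne.symm h13)
  have q14 : ("Africa" == s) = false := beq_eq_false_iff_ne.mpr (Ne.symm h14)
  have b0 : (s == "Europe") = false := beq_eq_false_iff_ne.mpr h0
  have b1 : (s == "United States") = false := beq_eq_false_iff_ne.mpr h1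
  have b2 : (s == "Canada") = false := beq_eq_false_iff_ne.mpr h2
  have b3 : (s == "Australia") = false := beq_eq_false_iff_ne.mpr h3
  have b4 : (s == "New Zealand") = false := beq_eq_false_iff_ne.mpr h4
  have b5 : (s == "Japan") = false := beq_eq_false_iff_ne.mpr h5
  have b6 : (s == "South Korea") = false := beq_eq_false_iff_ne.mpr h6
  have b7 : (s == "North America") = false := beq_eq_false_iff_ne.mpr h7
  have b8 : (s == "Oceania") = false := beq_eq_false_iff_ne.mpr h8
  have b9 : (s == "South America") = false := beq_eq_false_iff_ne.mpr h9
  have b10 : (s == "Southeast Asia") = false := beq_eq_false_iff_ne.mpr h10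
  have b11 : (s == "Eastern Asia") = false := beq_eq_false_iff_ne.mpr h11
  have b12 : (s == "Middle East") = false := beq_eq_false_iff_ne.mpr h12
  have b13 : (s == "Southern Asia and Central Asia") = false := beq_eq_false_iff_ne.mpr h13
  have b14 : (s == "Africa") = false := beq_eq_false_iff_ne.mpr h14
  have hnil : (PySem.Dict.mk ([] : List (String × Int))).get? s = none := rfl
  simp only [PySem.Dict.get?_mk_cons, hnil, List.contains_cons, List.contains_nil, q0, q1, q2, q3, q4, q5, q6, q7, q8, q9, q10, q11, q12, q13, q14, b0, b1, b2, b3, b4, b5, b6, b7, b8, b9, b10, b11, b12, b13, b14,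
    Bool.false_eq_true, if_false]
  refine ⟨rfl, rfl, rfl, rfl, rfl, rfl, rfl, ?_⟩
  simp [wrVals]

-- ===== VERDICT (by name: the statement is the Claim_ definition above) =====
set_option maxHeartbeats 4000000 in
theorem which_row_spec : Claim_equal_which_row := by
  intro c n g _
  unfold Spec_which_row which_row which_row_alt pvRows
  obtain ⟨c0, c1, c2, c3, c4, c5, c6, hc⟩ := wr_key c
  obtain ⟨n0, n1, n2, n3, n4, n5, n6, hn⟩ := wr_key n
  obtain ⟨g0, g1, g2, g3, g4, g5, g6, hg⟩ := wr_key g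
  simp only [wrScan, c0, c1, c2, c3, c4, c5, c6, n0, n1, n2, n3, n4, n5, n6,
    g0, g1, g2, g3, g4, g5, g6, List.filterMap_cons, List.filterMap_nil]
  simp only [wrVals, List.mem_cons, List.not_mem_nil, or_false] at hc hn hg
  revert hc hn hg
  generalize wrIndex.get? c = a
  generalize wrIndex.get? n = b
  generalize wrIndex.get? g = d
  intro hc hn hg
  rcases hc with rfl|rfl|rfl|rfl|rfl|rfl|rfl|rfl <;>
    rcases hn with rfl|rfl|rfl|rfl|rfl|rfl|rfl|rfl <;>
      rcases hg with rfl|rfl|rfl|rfl|rfl|rfl|rfl|rfl <;> decide
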